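-- pv_equiv track=rewrite | github.com/agent-fox-dev/agent-fox-v2 | agent_fox/scope_guard/source_parser.py | _extract_brace_body
-- ===== SOURCE A (Python) =====
-- def _extract_brace_body(
--     source: str, open_brace_pos: int
-- ) -> tuple[str, int, int] | None:
--     """Extract the body between matched braces starting at *open_brace_pos*.
--
--     Returns ``(body_text, start_line, end_line)`` or ``None`` when braces
--     are unbalanced.  Lines are 1-indexed.
--     """
--     depth = 0
--     i = open_brace_pos
--     length = len(source)
--     while i < length:
--         ch = source[i]
--         if ch == "{":
--             depth += 1
--         elif ch == "}":
--             depth -= 1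
--             if depth == 0:
--                 body = source[open_brace_pos + 1 : i]
--                 start_line = source[:open_brace_pos].count("\n") + 1
--                 end_line = source[: i + 1].count("\n") + 1
--                 return body, start_line, end_line
--         elif ch == '"':
--             i += 1
--             while i < length and source[i] != '"':
--                 if source[i] == "\\":
--                     i += 1
--                 i += 1
--         elif ch == "'":
--             i += 1
--             while i < length and source[i] != "'":
--                 if source[i] == "\\":
--                     i += 1
--                 i += 1
--         i += 1
--     return None
-- ===== SOURCE B (Python) =====
-- def _extract_brace_body(
--     source: str, open_brace_pos: int
-- ) -> tuple[str, int, int] | None: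
--     """Single flat scan with an explicit string-mode/escape state machine."""
--     depth = 0
--     quote = None  # None = normal mode, else the opening quote char
--     escape = False
--     i = open_brace_pos
--     n = len(source)
--     while i < n:
--         ch = source[i]
--         if quote is None:
--             if ch == "{":
--                 depth += 1
--             elif ch == "}":
--                 depth -= 1
--                 if depth == 0:
--                     return (
--                         source[open_brace_pos + 1 : i],
--                         source[:open_brace_pos].count("\n") + 1,
--                         source[: i + 1].count("\n") + 1,
--                     )
--             elif ch == '"' or ch == "'":
--                 quote = ch
--         elif escape:
--             escape = False
--         elif ch == "\\":
--             escape = True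
--         elif ch == quote:
--             quote = None
--         i += 1
--     return None
-- ===== Notes on version B (the rewrite author's own statement) =====
-- stated objective: simpler
-- what changed: Replaces A's nested inner scanning loops for string literals by a single flat loop over one index with an explicit state machine (current quote character or None, plus an escape flag).
import Mathlib
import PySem

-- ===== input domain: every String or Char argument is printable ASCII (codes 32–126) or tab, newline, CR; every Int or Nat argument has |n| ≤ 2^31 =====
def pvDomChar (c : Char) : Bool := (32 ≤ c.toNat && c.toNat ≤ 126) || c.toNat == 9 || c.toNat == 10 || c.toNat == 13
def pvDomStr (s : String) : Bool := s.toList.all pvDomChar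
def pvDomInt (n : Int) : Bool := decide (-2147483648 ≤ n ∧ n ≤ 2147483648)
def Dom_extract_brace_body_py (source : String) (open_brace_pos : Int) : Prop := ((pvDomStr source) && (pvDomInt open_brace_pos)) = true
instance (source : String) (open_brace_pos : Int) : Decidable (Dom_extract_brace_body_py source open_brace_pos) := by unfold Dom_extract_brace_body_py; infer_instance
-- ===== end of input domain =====

-- B replaces A's nested string-scanning loops by one flat loop with an explicit
-- quote/escape state machine (objective: simpler); behaviour is identical.


-- ===== PORT A =====
-- Both while loops are encoded with a fuel parameter (the standard total encoding of
-- 'while i < length'); the wrapper passes fuel > remaining indices, so fuel never runs out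
-- on any admitted input.  pyGet? = none is Python's IndexError (excluded by Pre_).
-- inner loop: while i < length and source[i] != q: if source[i] == "\\": i += 1; i += 1
def pvA_strSkip (source : String) (len : Int) (q : Char) : Nat → Int → Int
  | 0, i => i
  | fuel + 1, i =>
    if i < len ∧ PySem.Str.pyGet? source i ≠ some q then
      if PySem.Str.pyGet? source i = some '\\' then pvA_strSkip source len q fuel (i + 2)
      else pvA_strSkip source len q fuel (i + 1)
    else i

-- outer loop of A
def pvA_loop (source : String) (len obp : Int) : Nat → Int → Int → Option (String × Int × Int)
  | 0, _, _ => none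
  | fuel + 1, depth, i =>
    if i < len then
      match PySem.Str.pyGet? source i with
      | none => none
      | some ch =>
        if ch = '{' then pvA_loop source len obp fuel (depth + 1) (i + 1)
        else if ch = '}' then
          if depth - 1 = 0 then
            some (PySem.Str.slice source (some (obp + 1)) (some i),
                  (PySem.Str.count (PySem.Str.slice source none (some obp)) "\n" : Int) + 1,
                  (PySem.Str.count (PySem.Str.slice source none (some (i + 1))) "\n" : Int) + 1)
          else pvA_loop source len obp fuel (depth - 1) (i + 1)
        else if ch = '"' then
          pvA_loop source len obp fuel depth (pvA_strSkip source len '"' fuel (i + 1) + 1)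
        else if ch = '\'' then
          pvA_loop source len obp fuel depth (pvA_strSkip source len '\'' fuel (i + 1) + 1)
        else pvA_loop source len obp fuel depth (i + 1)
    else none

def extract_brace_body_py (source : String) (open_brace_pos : Int) : Option (String × Int × Int) :=
  pvA_loop source (PySem.Str.len source) open_brace_pos
    ((PySem.Str.len source - open_brace_pos).toNat + 1) 0 open_brace_pos

-- ===== PORT B =====
-- one flat loop; state = (depth, i, quote : Option Char, escape : Bool); same fuel encoding
def pvB_loop (source : String) (len obp : Int) : Nat → Int → Int → Option Char → Bool → Option (String × Int × Int)
  | 0, _, _, _, _ => none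
  | fuel + 1, depth, i, quote, escape =>
    if i < len then
      match PySem.Str.pyGet? source i with
      | none => none  -- IndexError; unreachable under Pre_
      | some ch =>
        match quote with
        | none =>
          if ch = '{' then pvB_loop source len obp fuel (depth + 1) (i + 1) none false
          else if ch = '}' then
            if depth - 1 = 0 then
              some (PySem.Str.slice source (some (obp + 1)) (some i),
                    (PySem.Str.count (PySem.Str.slice source none (some obp)) "\n" : Int) + 1,
                    (PySem.Str.count (PySem.Str.slice source none (some (i + 1))) "\n" : Int) + 1)
            else pvB_loop source len obp fuel (depth - 1) (i + 1) none false
          else if ch = '"' ∨ ch = '\'' then pvB_loop source len obp fuel depth (i + 1) (some ch) false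
          else pvB_loop source len obp fuel depth (i + 1) none false
        | some q =>
          if escape then pvB_loop source len obp fuel depth (i + 1) (some q) false
          else if ch = '\\' then pvB_loop source len obp fuel depth (i + 1) (some q) true
          else if ch = q then pvB_loop source len obp fuel depth (i + 1) none false
          else pvB_loop source len obp fuel depth (i + 1) (some q) false
    else none

def extract_brace_body_py_alt (source : String) (open_brace_pos : Int) : Option (String × Int × Int) :=
  pvB_loop source (PySem.Str.len source) open_brace_pos
    ((PySem.Str.len source - open_brace_pos).toNat + 1) 0 open_brace_pos none false

-- ===== PRECONDITION & SPEC =====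
-- Pre_ excludes exactly the inputs where Python raises IndexError (open_brace_pos < -len(source)):
-- there BOTH A and B raise on the first subscript, so nothing A returns on is excluded.
def Pre_extract_brace_body_py (source : String) (open_brace_pos : Int) : Prop :=
  -(PySem.Str.len source) ≤ open_brace_pos
instance (source : String) (open_brace_pos : Int) : Decidable (Pre_extract_brace_body_py source open_brace_pos) := by unfold Pre_extract_brace_body_py; infer_instance

def pvWitness_extract_brace_body_py : String × Int := ("fn x {\n \"}\" ok\n}", 5)

def Spec_extract_brace_body_py (source : String) (open_brace_pos : Int) (out : Option (String × Int × Int)) : Prop := out = extract_brace_body_py_alt source open_brace_pos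
instance (source : String) (open_brace_pos : Int) (out : Option (String × Int × Int)) : Decidable (Spec_extract_brace_body_py source open_brace_pos out) := by unfold Spec_extract_brace_body_py; infer_instance

-- ===== CLAIM (what is proved, stated in full; the proofs are below) =====
def Claim_equal_extract_brace_body_py : Prop := ∀ (source : String) (open_brace_pos : Int), Dom_extract_brace_body_py source open_brace_pos → Pre_extract_brace_body_py source open_brace_pos → Spec_extract_brace_body_py source open_brace_pos (extract_brace_body_py source open_brace_pos)

-- ===== LEMMAS AND PROOFS =====

-- in range ⇒ subscripting succeeds
theorem pvGet_some (s : List Char) (i : Int) (h1 : -(s.length : Int) ≤ i) (h2 : i < s.length) :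
    ∃ c, PySem.List.pyGet? s i = some c := by
  unfold PySem.List.pyGet? PySem.List.pyIdx?
  by_cases h3 : 0 ≤ i
  · rw [if_pos h3, if_pos (by omega : i < (s.length : Int))]
    exact ⟨s[i.toNat]'(by omega), by simp [List.getElem?_eq_getElem (by omega : i.toNat < s.length)]⟩
  · rw [if_neg h3, if_pos h1]
    exact ⟨s[s.length - (-i).toNat]'(by omega),
           by simp [List.getElem?_eq_getElem (by omega : s.length - (-i).toNat < s.length)]⟩

theorem pvStrGet_some (source : String) (i : Int) (h1 : -(source.toList.length : Int) ≤ i)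
    (h2 : i < source.toList.length) : ∃ c, PySem.Str.pyGet? source i = some c := by
  rw [PySem.Str.pyGet?_eq, PySem.Chars.pyGet?_eq_listPyGet?]
  exact pvGet_some source.toList i h1 h2

-- main simulation, by strong induction on the remaining gap (len - i).toNat:
-- phase 1: B's flat loop in normal mode equals A's outer loop;
-- phase 2: B's flat loop in string mode q equals A's outer loop resumed after A's inner skip loop.
theorem pvAB_main (source : String) (len obp : Int)
    (hlen : len = (source.toList.length : Int)) (g : Nat) :
    (∀ (i depth : Int) (fa fb : Nat), (len - i).toNat = g →
        (len - i).toNat < fa → (len - i).toNat < fb → -len ≤ i →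
        pvB_loop source len obp fb depth i none false = pvA_loop source len obp fa depth i)
  ∧ (∀ (i depth : Int) (q : Char) (fs fa fb : Nat), (q = '"' ∨ q = '\'') →
        (len - i).toNat = g → (len - i).toNat < fs → (len - i).toNat < fa →
        (len - i).toNat < fb → -len ≤ i →
        pvB_loop source len obp fb depth i (some q) false
          = pvA_loop source len obp fa depth (pvA_strSkip source len q fs i + 1)) := by
  induction g using Nat.strong_induction_on with
  | _ g IH =>
  constructor
  · -- phase 1: normal mode
    intro i depth fa fb hg hfa hfb hi
    obtain ⟨fa', rfl⟩ : ∃ k, fa = k + 1 := ⟨fa - 1, by omega⟩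
    obtain ⟨fb', rfl⟩ : ∃ k, fb = k + 1 := ⟨fb - 1, by omega⟩
    by_cases hil : i < len
    · obtain ⟨c, hc⟩ := pvStrGet_some source i (by omega) (by omega)
      rw [pvA_loop, pvB_loop, if_pos hil, if_pos hil, hc]
      dsimp only
      by_cases h1 : c = '{'
      · rw [if_pos h1, if_pos h1]
        exact (IH (len - (i + 1)).toNat (by omega)).1 (i + 1) (depth + 1) fa' fb' rfl
          (by omega) (by omega) (by omega)
      · rw [if_neg h1, if_neg h1]
        by_cases h2 : c = '}'
        · rw [if_pos h2, if_pos h2]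
          by_cases h3 : depth - 1 = 0
          · rw [if_pos h3, if_pos h3]
          · rw [if_neg h3, if_neg h3]
            exact (IH (len - (i + 1)).toNat (by omega)).1 (i + 1) (depth - 1) fa' fb' rfl
              (by omega) (by omega) (by omega)
        · rw [if_neg h2, if_neg h2]
          by_cases h4 : c = '"'
          · rw [if_pos h4, if_pos (Or.inl h4), h4]
            exact (IH (len - (i + 1)).toNat (by omega)).2 (i + 1) depth '"' fa' fa' fb'
              (Or.inl rfl) rfl (by omega) (by omega) (by omega) (by omega)
          · rw [if_neg h4]
            by_cases h5 : c = '\''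
            · rw [if_pos h5, if_pos (Or.inr h5), h5]
              exact (IH (len - (i + 1)).toNat (by omega)).2 (i + 1) depth '\'' fa' fa' fb'
                (Or.inr rfl) rfl (by omega) (by omega) (by omega) (by omega)
            · rw [if_neg h5, if_neg (by simp [h4, h5])]
              exact (IH (len - (i + 1)).toNat (by omega)).1 (i + 1) depth fa' fb' rfl
                (by omega) (by omega) (by omega)
    · rw [pvA_loop, pvB_loop, if_neg hil, if_neg hil]
  · -- phase 2: string mode
    intro i depth q fs fa fb hq hg hfs hfa hfb hi
    have hqbs : q ≠ '\\' := by rcases hq with h' | h' <;> simp [h']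
    obtain ⟨fs', rfl⟩ : ∃ k, fs = k + 1 := ⟨fs - 1, by omega⟩
    obtain ⟨fb', rfl⟩ : ∃ k, fb = k + 1 := ⟨fb - 1, by omega⟩
    by_cases hil : i < len
    · obtain ⟨c, hc⟩ := pvStrGet_some source i (by omega) (by omega)
      rw [pvB_loop, if_pos hil, hc]
      dsimp only
      simp only [Bool.false_eq_true, if_false]
      by_cases hcq : c = q
      · -- closing quote: both sides continue in normal mode at i + 1
        have hskip : pvA_strSkip source len q (fs' + 1) i = i := by
          rw [pvA_strSkip, if_neg (by rintro ⟨-, hne⟩; exact hne (by rw [hc, hcq]))]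
        rw [if_neg (by rw [hcq]; exact hqbs), if_pos hcq, hskip]
        exact (IH (len - (i + 1)).toNat (by omega)).1 (i + 1) depth fa fb' rfl
          (by omega) (by omega) (by omega)
      · have hskipstep : ∀ j, pvA_strSkip source len q (fs' + 1) i = j →
            (c = '\\' → j = pvA_strSkip source len q fs' (i + 2)) ∧
            (c ≠ '\\' → j = pvA_strSkip source len q fs' (i + 1)) := by
          intro j hj
          constructor <;> intro hcb
          · rw [← hj, pvA_strSkip,
              if_pos ⟨hil, by rw [hc]; intro he; exact hcq (Option.some.inj he)⟩,
              if_pos (by rw [hc, hcb])]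
          · rw [← hj, pvA_strSkip,
              if_pos ⟨hil, by rw [hc]; intro he; exact hcq (Option.some.inj he)⟩,
              if_neg (by rw [hc]; intro he; exact hcb (Option.some.inj he))]
        by_cases hcb : c = '\\'
        · -- backslash: B sets the escape flag and consumes the next char
          rw [if_pos hcb, ((hskipstep _ rfl).1 hcb)]
          by_cases hil2 : i + 1 < len
          · obtain ⟨c2, hc2⟩ := pvStrGet_some source (i + 1) (by omega) (by omega)
            obtain ⟨fb'', rfl⟩ : ∃ k, fb' = k + 1 := ⟨fb' - 1, by omega⟩
            rw [pvB_loop, if_pos hil2, hc2]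
            dsimp only
            simp only [if_true]
            have e : i + 1 + 1 = i + 2 := by omega
            rw [e]
            exact (IH (len - (i + 2)).toNat (by omega)).2 (i + 2) depth q fs' fa fb''
              hq rfl (by omega) (by omega) (by omega) (by omega)
          · -- the escaped char was the last one: the string never closes, both sides give none
            obtain ⟨fb'', rfl⟩ : ∃ k, fb' = k + 1 := ⟨fb' - 1, by omega⟩
            rw [pvB_loop, if_neg hil2]
            obtain ⟨fs'', rfl⟩ : ∃ k, fs' = k + 1 := ⟨fs' - 1, by omega⟩
            rw [pvA_strSkip, if_neg (by rintro ⟨h3, -⟩; omega)]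
            obtain ⟨fa', rfl⟩ : ∃ k, fa = k + 1 := ⟨fa - 1, by omega⟩
            rw [pvA_loop, if_neg (by omega)]
        · -- ordinary char inside the string
          rw [if_neg hcb, if_neg hcq, ((hskipstep _ rfl).2 hcb)]
          exact (IH (len - (i + 1)).toNat (by omega)).2 (i + 1) depth q fs' fa fb'
            hq rfl (by omega) (by omega) (by omega) (by omega)
    · -- i ≥ len: the string never closes, both sides give none
      have hskip : pvA_strSkip source len q (fs' + 1) i = i := by
        rw [pvA_strSkip, if_neg (by rintro ⟨h3, -⟩; omega)]
      rw [hskip, pvB_loop, if_neg hil]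
      obtain ⟨fa', rfl⟩ : ∃ k, fa = k + 1 := ⟨fa - 1, by omega⟩
      rw [pvA_loop, if_neg (by omega)]

-- ===== VERDICT (by name: the statement is the Claim_ definition above) =====
theorem extract_brace_body_py_spec : Claim_equal_extract_brace_body_py := by
  intro source obp _hdom hpre
  unfold Spec_extract_brace_body_py extract_brace_body_py extract_brace_body_py_alt
  have hlen : PySem.Str.len source = (source.toList.length : Int) := PySem.Str.len_eq source
  unfold Pre_extract_brace_body_py at hpre
  exact ((pvAB_main source (PySem.Str.len source) obp hlen
      ((PySem.Str.len source - obp).toNat)).1 obp 0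
      ((PySem.Str.len source - obp).toNat + 1) ((PySem.Str.len source - obp).toNat + 1)
      rfl (by omega) (by omega) hpre).symm
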